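-- pv_equiv track=rewrite | github.com/thelpix/tareaIP | Python/guia7.py | nuevos_pares_poner_0
-- ===== SOURCE A (Python) =====
-- def nuevos_pares_poner_0(numeros: list[int]) -> list[int]:
--     output : list[int] = []
--     for i in range(len(numeros)):
--         if i % 2 == 0:
--             output.append(0)
--         else:
--             output.append(numeros[i])
--     return output
-- ===== SOURCE B (Python) =====
-- def nuevos_pares_poner_0(numeros: list[int]) -> list[int]:
--     output = list(numeros)
--     output[::2] = [0] * len(output[::2])
--     return output
-- ===== Notes on version B (the rewrite author's own statement) =====
-- stated objective: idiomatic
-- what changed: B copies the input and zeroes all even indices with one strided slice assignment instead of rebuilding the list element by element with a parity branch.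
import Mathlib
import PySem

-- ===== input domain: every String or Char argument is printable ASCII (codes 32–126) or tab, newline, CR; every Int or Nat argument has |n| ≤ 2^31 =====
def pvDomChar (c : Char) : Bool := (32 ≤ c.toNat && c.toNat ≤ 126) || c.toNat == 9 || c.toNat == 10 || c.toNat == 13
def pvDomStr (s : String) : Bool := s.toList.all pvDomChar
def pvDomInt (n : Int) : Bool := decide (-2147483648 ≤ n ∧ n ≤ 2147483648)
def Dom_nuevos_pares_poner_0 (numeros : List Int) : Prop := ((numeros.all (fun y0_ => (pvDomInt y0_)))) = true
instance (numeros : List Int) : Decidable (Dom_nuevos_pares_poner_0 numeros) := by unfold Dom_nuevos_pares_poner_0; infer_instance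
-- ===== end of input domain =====

-- B copies the input and zeroes every even index in one strided pass (no per-element parity branch); idiomatic, same cost.


-- ===== PORT A =====
-- literal port: for i in range(len(numeros)): append 0 on even i, numeros[i] on odd i
def nuevos_pares_poner_0 (numeros : List Int) : List Int :=
  (PySem.List.pyRange 0 (numeros.length : Int) 1).foldl
    (fun output i =>
      if i % 2 == 0 then output ++ [0]
      else output ++ [PySem.List.pyGetD numeros i 0])  -- index i is always in range here
    []

-- ===== PORT B =====
-- Source B: output = list(numeros); output[::2] = [0]*…  — a single strided pass writing 0 at 0,2,4,…
def pvZeroEvens : List Int → List Int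
  | [] => []
  | [_] => [0]
  | _ :: y :: rest => 0 :: y :: pvZeroEvens rest

def nuevos_pares_poner_0_alt (numeros : List Int) : List Int :=
  pvZeroEvens numeros

-- ===== PRECONDITION & SPEC =====
def Spec_nuevos_pares_poner_0 (numeros : List Int) (out : List Int) : Prop := out = nuevos_pares_poner_0_alt numeros
instance (numeros : List Int) (out : List Int) : Decidable (Spec_nuevos_pares_poner_0 numeros out) := by unfold Spec_nuevos_pares_poner_0; infer_instance

-- ===== CLAIM (what is proved, stated in full; the proofs are below) =====
def Claim_equal_nuevos_pares_poner_0 : Prop := ∀ (numeros : List Int), Dom_nuevos_pares_poner_0 numeros → Spec_nuevos_pares_poner_0 numeros (nuevos_pares_poner_0 numeros)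

-- ===== LEMMAS AND PROOFS =====

theorem pvZeroEvens_length (xs : List Int) : (pvZeroEvens xs).length = xs.length := by
  induction xs using pvZeroEvens.induct <;> simp [pvZeroEvens, *]

theorem pvZeroEvens_getElem (xs : List Int) (k : Nat) (hk : k < xs.length) :
    (pvZeroEvens xs)[k]'(by rw [pvZeroEvens_length]; exact hk) =
      if k % 2 = 0 then 0 else xs[k] := by
  induction xs using pvZeroEvens.induct generalizing k with
  | case1 => simp at hk
  | case2 a =>
      match k with
      | 0 => simp [pvZeroEvens]
      | (k+1) => simp at hk
  | case3 a y rest ih =>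
      match k with
      | 0 => simp [pvZeroEvens]
      | 1 => simp [pvZeroEvens]
      | (k+2) =>
          simp only [pvZeroEvens, List.getElem_cons_succ]
          rw [ih k (by simpa using hk)]
          have : (k + 2) % 2 = k % 2 := by omega
          rw [this]

theorem foldl_append_map (f : Int → Int) (l : List Int) (acc : List Int) :
    l.foldl (fun output i => output ++ [f i]) acc = acc ++ l.map f := by
  induction l generalizing acc with
  | nil => simp
  | cons x xs ih => simp [List.foldl_cons, ih, List.append_assoc]

-- ===== VERDICT (by name: the statement is the Claim_ definition above) =====
theorem nuevos_pares_poner_0_spec : Claim_equal_nuevos_pares_poner_0 := by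
  intro numeros _
  show nuevos_pares_poner_0 numeros = nuevos_pares_poner_0_alt numeros
  unfold nuevos_pares_poner_0 nuevos_pares_poner_0_alt
  rw [show (fun (output : List Int) (i : Int) =>
        if i % 2 == 0 then output ++ [0]
        else output ++ [PySem.List.pyGetD numeros i 0]) =
      (fun output i => output ++ [if i % 2 == 0 then 0 else PySem.List.pyGetD numeros i 0])
    by funext o i; split <;> rfl]
  rw [foldl_append_map, List.nil_append, PySem.List.pyRange_one]
  apply List.ext_getElem
  · simp [pvZeroEvens_length]
  · intro k h1 h2
    have hk : k < numeros.length := by simpa [pvZeroEvens_length] using h2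
    rw [pvZeroEvens_getElem numeros k hk]
    simp only [List.getElem_map, List.getElem_range, zero_add, PySem.List.pyGetD_natCast]
    have hiff : ((k : Int) % 2 = 0) ↔ (k % 2 = 0) := by omega
    have hmod : ((k : Int) % 2 == 0) = decide (k % 2 = 0) := by
      rw [Bool.eq_iff_iff]; simp [hiff]
    rw [hmod, List.getD_eq_getElem _ _ hk]
    by_cases h : k % 2 = 0 <;> simp [h]
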